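-- pv_equiv track=rewrite | github.com/Gribachella/pygen-labs | password_generator(1.3c).py | get_uniq_charsets
-- ===== SOURCE A (Python) =====
-- def get_uniq_charsets(charset, user_charset, ambiguous_include):
--     combine = [i.copy() for i in charset] + [j.copy() for j in user_charset]
--     uniq_charsets = []
--     ambiguous = '0Ooi1lI'
--
--     for i in range(len(combine)):
--         uniq_chars = []
--
--         for j in combine[i]:
--             if not ambiguous_include:
--                 if j not in uniq_chars and j not in ambiguous:
--                     uniq_chars.append(j)
--             else:
--                 if j not in uniq_chars:
--                     uniq_chars.append(j)
--
--             for k in range(i + 1, len(combine)):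
--                 combine[k] = [m for m in combine[k] if m != j]
--
--         uniq_charsets.append(uniq_chars.copy())
--
--     while [] in uniq_charsets:
--         uniq_charsets.remove([])
--
--     return uniq_charsets
-- ===== SOURCE B (Python) =====
-- def get_uniq_charsets(charset, user_charset, ambiguous_include):
--     ambiguous = '0Ooi1lI'
--     seen = set()
--     result = []
--     for lst in charset + user_charset:
--         kept = []
--         for c in lst:
--             if c not in seen:
--                 seen.add(c)
--                 if ambiguous_include or c not in ambiguous:
--                     kept.append(c)
--         if kept:
--             result.append(kept)
--     return result
-- ===== Notes on version B (the rewrite author's own statement) =====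
-- stated objective: faster
-- what changed: Replaces A's triple-nested loop that physically deletes each seen element from every later charset (plus a per-list membership scan) with a single pass over the lists threading one global 'seen' set: a char is kept iff it is globally unseen and (included or not ambiguous); empty lists are skipped inline.
import Mathlib
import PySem

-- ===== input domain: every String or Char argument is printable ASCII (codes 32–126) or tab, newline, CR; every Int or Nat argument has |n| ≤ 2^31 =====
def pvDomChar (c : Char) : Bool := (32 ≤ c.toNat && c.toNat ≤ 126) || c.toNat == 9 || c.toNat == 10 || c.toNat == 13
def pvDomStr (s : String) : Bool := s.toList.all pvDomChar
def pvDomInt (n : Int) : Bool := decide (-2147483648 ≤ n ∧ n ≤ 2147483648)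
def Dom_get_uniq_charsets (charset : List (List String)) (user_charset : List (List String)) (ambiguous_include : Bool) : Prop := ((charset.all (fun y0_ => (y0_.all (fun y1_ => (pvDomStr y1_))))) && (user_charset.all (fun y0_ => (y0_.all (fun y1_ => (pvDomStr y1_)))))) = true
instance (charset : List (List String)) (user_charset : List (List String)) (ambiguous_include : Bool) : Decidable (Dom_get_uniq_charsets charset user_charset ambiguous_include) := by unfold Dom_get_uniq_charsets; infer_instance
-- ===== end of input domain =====

-- B replaces A's nested physical deletion from later charsets with one pass threading a global seen-set (measured faster).
-- A's list .copy() calls are identity on immutable Lean values; A does not mutate its arguments.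


-- ===== PORT A =====
-- "j in '0Ooi1lI'" — Python's substring test on strings
def pvSub (j : String) : Bool := PySem.Str.isIn j "0Ooi1lI"

-- the inner 'for j in combine[i]' loop: builds uniq_chars (branch order as in A) and
-- filters every LATER list ('combine[k] = [m for m in combine[k] if m != j]')
def pvInner (inc : Bool) : List String → List String → List (List String) → List String × List (List String)
  | [], u, rest => (u, rest)
  | j :: js, u, rest =>
      let u' := if !inc then (if ¬ j ∈ u ∧ ¬ pvSub j = true then u ++ [j] else u)
                else (if ¬ j ∈ u then u ++ [j] else u)
      pvInner inc js u' (rest.map (List.filter (fun m => !(m == j))))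

theorem pvInner_snd_length (inc : Bool) (cur u : List String) (rest : List (List String)) :
    (pvInner inc cur u rest).2.length = rest.length := by
  induction cur generalizing u rest with
  | nil => rfl
  | cons j js ih => simp [pvInner, ih]

-- the outer 'for i in range(len(combine))' loop: only lists AFTER i are ever mutated and
-- list i is read once, so the index loop over the mutated combine is the recursion on the suffix
def pvGo (inc : Bool) : List (List String) → List (List String)
  | [] => []
  | cur :: rest =>
      let p := pvInner inc cur [] rest
      p.1 :: pvGo inc p.2
  termination_by L => L.length
  decreasing_by simp [pvInner_snd_length]

-- 'while [] in uniq_charsets: uniq_charsets.remove([])' — net effect: every [] is removed, order kept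
def pvDropEmpty : List (List String) → List (List String)
  | [] => []
  | x :: xs => if x = [] then pvDropEmpty xs else x :: pvDropEmpty xs

def get_uniq_charsets (charset : List (List String)) (user_charset : List (List String)) (ambiguous_include : Bool) : List (List String) :=
  pvDropEmpty (pvGo ambiguous_include (charset ++ user_charset))

-- ===== PORT B =====
-- per-char step: skip if globally seen, else record as seen and keep unless dropped as ambiguous
def pvBInner (inc : Bool) (st : PySem.Set String × List String) (c : String) : PySem.Set String × List String :=
  if ¬ c ∈ st.1 then (PySem.Set.add st.1 c, if inc || !pvSub c then st.2 ++ [c] else st.2) else st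

-- per-list step: collect the kept chars of this list; append them only if nonempty
def pvBStep (inc : Bool) (st : PySem.Set String × List (List String)) (lst : List String) : PySem.Set String × List (List String) :=
  let r := lst.foldl (pvBInner inc) (st.1, [])
  (r.1, if r.2 ≠ [] then st.2 ++ [r.2] else st.2)

def get_uniq_charsets_alt (charset : List (List String)) (user_charset : List (List String)) (ambiguous_include : Bool) : List (List String) :=
  ((charset ++ user_charset).foldl (pvBStep ambiguous_include) (PySem.Set.empty, [])).2

-- ===== PRECONDITION & SPEC =====
def Spec_get_uniq_charsets (charset : List (List String)) (user_charset : List (List String)) (ambiguous_include : Bool) (out : List (List String)) : Prop := out = get_uniq_charsets_alt charset user_charset ambiguous_include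
instance (charset : List (List String)) (user_charset : List (List String)) (ambiguous_include : Bool) (out : List (List String)) : Decidable (Spec_get_uniq_charsets charset user_charset ambiguous_include out) := by unfold Spec_get_uniq_charsets; infer_instance

-- ===== CLAIM (what is proved, stated in full; the proofs are below) =====
def Claim_equal_get_uniq_charsets : Prop := ∀ (charset : List (List String)) (user_charset : List (List String)) (ambiguous_include : Bool), Dom_get_uniq_charsets charset user_charset ambiguous_include → Spec_get_uniq_charsets charset user_charset ambiguous_include (get_uniq_charsets charset user_charset ambiguous_include)

-- ===== LEMMAS AND PROOFS =====

-- common specification: walking one list with already-seen chars P, keep each first-sighted char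
-- unless it is ambiguous and excluded
def pvSpec (inc : Bool) : List String → List String → List String
  | [], _ => []
  | c :: l, P => if c ∈ P then pvSpec inc l P else (if inc || !pvSub c then [c] else []) ++ pvSpec inc l (c :: P)

-- the u-accumulator of pvInner, alone
def pvU (inc : Bool) : List String → List String → List String
  | [], u => u
  | j :: js, u =>
      pvU inc js (if !inc then (if ¬ j ∈ u ∧ ¬ pvSub j = true then u ++ [j] else u)
                  else (if ¬ j ∈ u then u ++ [j] else u))

theorem pvInner_eq (inc : Bool) (cur : List String) (u : List String) (rest : List (List String)) :
    pvInner inc cur u rest = (pvU inc cur u, rest.map (List.filter (fun m => !(decide (m ∈ cur))))) := by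
  induction cur generalizing u rest with
  | nil =>
      have h : ∀ x : List String, x.filter (fun m => !decide (m ∈ ([] : List String))) = x := by
        intro x
        rw [List.filter_eq_self]
        intro a _
        simp
      simp only [pvInner, pvU]
      refine Prod.ext rfl ?_
      exact ((List.map_congr_left (fun x _ => h x)).trans (List.map_id _)).symm
  | cons j js ih =>
      simp only [pvInner, pvU, ih]
      refine Prod.ext rfl ?_
      simp only [List.map_map]
      apply List.map_congr_left
      intro l _
      simp only [Function.comp, List.filter_filter]
      apply List.filter_congr
      intro m _
      by_cases h1 : m = j <;> by_cases h2 : m ∈ js <;> simp [h1, h2]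

theorem pvU_eq_spec (inc : Bool) (l : List String) (P0 P u : List String)
    (hP0 : ∀ c, c ∈ P0 → c ∈ P)
    (h1 : ∀ c, c ∈ P → c ∉ P0 → (c ∈ u ↔ (inc || !pvSub c) = true))
    (h2 : ∀ c, c ∈ u → c ∈ P ∧ c ∉ P0) :
    pvU inc (l.filter (fun c => !(decide (c ∈ P0)))) u = u ++ pvSpec inc l P := by
  induction l generalizing P u with
  | nil => simp [pvU, pvSpec]
  | cons c l ih =>
      by_cases hc0 : c ∈ P0
      · have hcP : c ∈ P := hP0 c hc0
        rw [List.filter_cons_of_neg (by simp [hc0])]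
        have hs : pvSpec inc (c :: l) P = pvSpec inc l P := by simp [pvSpec, hcP]
        rw [hs]
        exact ih P u hP0 h1 h2
      · rw [List.filter_cons_of_pos (by simp [hc0])]
        by_cases hcP : c ∈ P
        · -- already seen in an earlier list of this run: pvU leaves u unchanged
          have hiff := h1 c hcP hc0
          have hu : (if (!inc) = true then (if ¬ c ∈ u ∧ ¬ pvSub c = true then u ++ [c] else u)
                     else (if ¬ c ∈ u then u ++ [c] else u)) = u := by
            by_cases hcu : c ∈ u
            · cases inc <;> simp [hcu]
            · have hsub : ¬ (inc || !pvSub c) = true := fun h => hcu (hiff.mpr h)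
              cases inc <;> simp_all
          have hs : pvSpec inc (c :: l) P = pvSpec inc l P := by simp [pvSpec, hcP]
          rw [hs]
          simp only [pvU]
          rw [hu]
          exact ih P u hP0 h1 h2
        · -- first global sighting of c
          have hcu : c ∉ u := fun h => hcP (h2 c h).1
          have hu : (if (!inc) = true then (if ¬ c ∈ u ∧ ¬ pvSub c = true then u ++ [c] else u)
                     else (if ¬ c ∈ u then u ++ [c] else u))
                    = u ++ (if (inc || !pvSub c) = true then [c] else []) := by
            by_cases hsub : pvSub c = true <;> cases inc <;> simp [hcu, hsub]
          have hs : pvSpec inc (c :: l) P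
              = (if (inc || !pvSub c) = true then [c] else []) ++ pvSpec inc l (c :: P) := by
            simp [pvSpec, hcP]
          rw [hs]
          simp only [pvU]
          rw [hu]
          rw [ih (c :: P) (u ++ (if (inc || !pvSub c) = true then [c] else []))
              (fun d hd => List.mem_cons_of_mem _ (hP0 d hd))
              (fun d hd hd0 => by
                rcases List.mem_cons.mp hd with rfl | hdP
                · constructor
                  · intro hmem
                    rcases List.mem_append.mp hmem with h | h
                    · exact absurd ((h2 d h).1) hcP
                    · split at h
                      · assumption
                      · simp at h
                  · intro hk
                    exact List.mem_append.mpr (Or.inr (by simp [hk]))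
                · have hne : d ≠ c := fun h => hcP (h ▸ hdP)
                  rw [List.mem_append]
                  constructor
                  · intro hmem
                    rcases hmem with h | h
                    · exact (h1 d hdP hd0).mp h
                    · split at h <;> simp_all
                  · intro hk
                    exact Or.inl ((h1 d hdP hd0).mpr hk))
              (fun d hd => by
                rcases List.mem_append.mp hd with h | h
                · exact ⟨List.mem_cons_of_mem _ (h2 d h).1, (h2 d h).2⟩
                · split at h
                  · simp at h
                    exact ⟨h ▸ List.mem_cons_self .., h ▸ hc0⟩
                  · simp at h)]
          rw [List.append_assoc]

theorem pvBFold (inc : Bool) (l : List String) (S : PySem.Set String) (acc P : List String)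
    (hS : ∀ c, c ∈ S ↔ c ∈ P) :
    (l.foldl (pvBInner inc) (S, acc)).2 = acc ++ pvSpec inc l P ∧
    (∀ c, c ∈ (l.foldl (pvBInner inc) (S, acc)).1 ↔ (c ∈ l ∨ c ∈ P)) := by
  induction l generalizing S acc P with
  | nil =>
      refine ⟨by simp [pvSpec], fun c => by simpa using hS c⟩
  | cons c l ih =>
      by_cases hc : c ∈ S
      · have hcP : c ∈ P := (hS c).mp hc
        have hstep : pvBInner inc (S, acc) c = (S, acc) := by simp [pvBInner, hc]
        simp only [List.foldl_cons, hstep]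
        obtain ⟨e1, e2⟩ := ih S acc P hS
        refine ⟨by simpa [pvSpec, hcP] using e1, fun d => ?_⟩
        rw [e2 d]
        constructor
        · rintro (h | h) <;> [exact Or.inl (List.mem_cons_of_mem _ h); exact Or.inr h]
        · rintro (h | h)
          · rcases List.mem_cons.mp h with rfl | h' <;> [exact Or.inr hcP; exact Or.inl h']
          · exact Or.inr h
      · have hcP : c ∉ P := fun h => hc ((hS c).mpr h)
        have hstep : pvBInner inc (S, acc) c
            = (PySem.Set.add S c, acc ++ (if (inc || !pvSub c) = true then [c] else [])) := by
          by_cases hsub : pvSub c = true <;> cases inc <;> simp [pvBInner, hc, hsub]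
        simp only [List.foldl_cons, hstep]
        obtain ⟨e1, e2⟩ := ih (PySem.Set.add S c)
          (acc ++ (if (inc || !pvSub c) = true then [c] else [])) (c :: P)
          (fun d => by
            rw [PySem.Set.mem_add, hS d, List.mem_cons]
            tauto)
        refine ⟨by rw [e1, List.append_assoc]; simp [pvSpec, hcP], fun d => ?_⟩
        rw [e2 d]
        simp only [List.mem_cons]
        tauto

theorem pvOuter (inc : Bool) (L : List (List String)) (S : PySem.Set String)
    (res : List (List String)) (P : List String)
    (hS : ∀ c, c ∈ S ↔ c ∈ P) :
    (L.foldl (pvBStep inc) (S, res)).2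
      = res ++ pvDropEmpty (pvGo inc (L.map (fun l => l.filter (fun c => !(decide (c ∈ P)))))) := by
  induction L generalizing S res P with
  | nil => simp [pvGo, pvDropEmpty]
  | cons l L ih =>
      obtain ⟨e1, e2⟩ := pvBFold inc l S [] P hS
      have hstep : pvBStep inc (S, res) l
          = ((l.foldl (pvBInner inc) (S, [])).1,
             if pvSpec inc l P ≠ [] then res ++ [pvSpec inc l P] else res) := by
        simp only [pvBStep, e1, List.nil_append]
      have hgo : pvGo inc ((l.filter (fun c => !(decide (c ∈ P)))) ::
            L.map (fun l' => l'.filter (fun c => !(decide (c ∈ P)))))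
          = pvSpec inc l P ::
            pvGo inc (L.map (fun l' => l'.filter (fun c => !(decide (c ∈ (l ++ P)))))) := by
        rw [pvGo, pvInner_eq]
        refine congrArg₂ _ ?_ (congrArg _ ?_)
        · have := pvU_eq_spec inc l P P []
            (fun c h => h) (fun c h h' => absurd h h') (fun c h => by simp at h)
          simpa using this
        · rw [List.map_map]
          apply List.map_congr_left
          intro l' _
          simp only [Function.comp, List.filter_filter]
          apply List.filter_congr
          intro m _
          by_cases h1 : m ∈ P <;> by_cases h2 : m ∈ l <;>
            simp [h1, h2, List.mem_filter, List.mem_append]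
      simp only [List.foldl_cons, hstep, List.map_cons, hgo]
      rw [ih _ _ (l ++ P) (fun d => by rw [e2 d]; simp [List.mem_append])]
      by_cases hk : pvSpec inc l P = []
      · simp [pvDropEmpty, hk]
      · simp [pvDropEmpty, hk, List.append_assoc]

-- ===== VERDICT (by name: the statement is the Claim_ definition above) =====
theorem get_uniq_charsets_spec : Claim_equal_get_uniq_charsets := by
  intro charset user_charset inc _
  unfold Spec_get_uniq_charsets get_uniq_charsets get_uniq_charsets_alt
  rw [pvOuter inc (charset ++ user_charset) PySem.Set.empty [] []
      (fun c => by simp [PySem.Set.empty])]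
  simp [List.filter_true]
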